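-- pv_equiv track=rewrite | github.com/danilo-parada/Herramienta-UGC | pages/03_📈_Fase_1_IRL.py | _aggregate_question_status
-- ===== SOURCE A (Python) =====
-- def _aggregate_question_status(respuestas: dict[str, str | None]) -> str | None:
--     if not respuestas:
--         return None
--     valores = list(respuestas.values())
--     if any(valor is None for valor in valores):
--         return None
--     if all(valor == "VERDADERO" for valor in valores):
--         return "VERDADERO"
--     return "FALSO"
-- ===== SOURCE B (Python) =====
-- def _aggregate_question_status(respuestas: dict[str, str | None]) -> str | None:
--     if not respuestas:
--         return None
--     worst = min(
--         0 if v is None else (2 if v == "VERDADERO" else 1)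
--         for v in respuestas.values()
--     )
--     return [None, "FALSO", "VERDADERO"][worst]
-- ===== Notes on version B (the rewrite author's own statement) =====
-- stated objective: alternative
-- what changed: Replaces A's boolean any/all scans with a rank-and-minimum formulation: each value is mapped to a rank (None=0, other=1, VERDADERO=2), the minimum rank is taken, and the answer is read from a three-entry table.
import Mathlib
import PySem

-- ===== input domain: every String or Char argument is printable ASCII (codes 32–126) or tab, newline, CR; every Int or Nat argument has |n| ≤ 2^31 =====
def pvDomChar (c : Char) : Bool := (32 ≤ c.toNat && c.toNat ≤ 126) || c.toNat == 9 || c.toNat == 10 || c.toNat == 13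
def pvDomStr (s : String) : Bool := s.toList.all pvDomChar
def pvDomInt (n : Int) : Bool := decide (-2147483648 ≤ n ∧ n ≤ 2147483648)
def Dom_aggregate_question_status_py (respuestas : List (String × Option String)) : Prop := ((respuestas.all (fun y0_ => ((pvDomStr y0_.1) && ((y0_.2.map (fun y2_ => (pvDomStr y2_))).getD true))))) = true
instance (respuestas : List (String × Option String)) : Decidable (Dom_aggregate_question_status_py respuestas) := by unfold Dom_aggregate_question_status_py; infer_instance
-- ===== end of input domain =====

-- One honest line: B replaces A's any/all boolean scans by mapping each value to a rank (None=0, other=1, VERDADERO=2), taking the minimum rank and reading the answer from a table; same O(n) cost, different algorithmic formulation.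

-- ===== PORT A =====
def aggregate_question_status_py (respuestas : List (String × Option String)) : Option String :=
  if respuestas = [] then none
  else
    let valores := respuestas.map (·.2)
    if valores.any (fun valor => valor.isNone) then none
    else if valores.all (fun valor => valor == some "VERDADERO") then some "VERDADERO"
    else some "FALSO"

-- ===== PORT B =====
def aggregate_question_status_py_alt (respuestas : List (String × Option String)) : Option String :=
  if respuestas = [] then none
  else
    let ranks : List Nat := respuestas.map (fun p =>
      match p.2 with
      | none => 0
      | some v => if v == "VERDADERO" then 2 else 1)
    match PySem.List.min? ranks (fun x => x) with
    | none => none  -- unreachable: ranks nonempty here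
    | some worst =>
      -- Python's [None, "FALSO", "VERDADERO"][worst]; worst ∈ {0,1,2} so always in range
      (PySem.List.pyGet? [none, some "FALSO", some "VERDADERO"] (worst : Int)).join

-- ===== PRECONDITION & SPEC =====
def Spec_aggregate_question_status_py (respuestas : List (String × Option String)) (out : Option String) : Prop := out = aggregate_question_status_py_alt respuestas
instance (respuestas : List (String × Option String)) (out : Option String) : Decidable (Spec_aggregate_question_status_py respuestas out) := by unfold Spec_aggregate_question_status_py; infer_instance

-- ===== CLAIM =====
def Claim_equal_aggregate_question_status_py : Prop := ∀ (respuestas : List (String × Option String)), Dom_aggregate_question_status_py respuestas → Spec_aggregate_question_status_py respuestas (aggregate_question_status_py respuestas)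

-- ===== LEMMAS AND PROOFS =====
def pvRank (p : String × Option String) : Nat :=
  match p.2 with
  | none => 0
  | some v => if v == "VERDADERO" then 2 else 1

theorem pvRank_some (a v : String) : pvRank (a, some v) = if v == "VERDADERO" then 2 else 1 := rfl

theorem pvRank_le_two (p : String × Option String) : pvRank p ≤ 2 := by
  obtain ⟨a, b⟩ := p
  cases b <;> simp [pvRank] <;> split <;> omega

theorem pvMin_spec (r : List (String × Option String)) (hne : r ≠ []) :
    ∃ m, PySem.List.min? (r.map pvRank) (fun x => x) = some m ∧
      m ∈ r.map pvRank ∧ ∀ y ∈ r.map pvRank, m ≤ y := by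
  cases h : PySem.List.min? (r.map pvRank) (fun x => x) with
  | none =>
    rw [PySem.List.min?_eq_none_iff, List.map_eq_nil_iff] at h
    exact absurd h hne
  | some m =>
    exact ⟨m, rfl, PySem.List.min?_mem h, fun y hy => PySem.List.min?_isMin h y hy⟩

-- ===== VERDICT =====
theorem aggregate_question_status_py_spec : Claim_equal_aggregate_question_status_py := by
  intro r _
  unfold Spec_aggregate_question_status_py aggregate_question_status_py aggregate_question_status_py_alt
  by_cases hnil : r = []
  · simp [hnil]
  · simp only [hnil, if_false]
    obtain ⟨m, hm, hmem, hmin⟩ := pvMin_spec r hnil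
    rw [show (fun p : String × Option String =>
        match p.2 with
        | none => (0 : Nat)
        | some v => if v == "VERDADERO" then 2 else 1) = pvRank from rfl, hm]
    have hm2 : m ≤ 2 := by
      obtain ⟨p, -, rfl⟩ := List.mem_map.mp hmem
      exact pvRank_le_two p
    by_cases hany : (r.map (·.2)).any (fun valor => valor.isNone) = true
    · -- some value is none, so 0 is a rank; m = 0
      have h0 : m = 0 := by
        rw [List.any_map, List.any_eq_true] at hany
        obtain ⟨p, hp, hiso⟩ := hany
        have : (0 : Nat) ∈ r.map pvRank := by
          refine List.mem_map.mpr ⟨p, hp, ?_⟩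
          unfold pvRank
          cases hc : p.2 with
          | none => rfl
          | some v => simp [hc] at hiso
        have := hmin 0 this
        omega
      subst h0
      simp only [hany, if_true]
      decide
    · have hnone : ∀ p ∈ r, p.2 ≠ none := by
        intro p hp hc
        apply hany
        rw [List.any_map, List.any_eq_true]
        exact ⟨p, hp, by simp [hc]⟩
      have hm0 : m ≠ 0 := by
        intro h0
        obtain ⟨p, hp, hpr⟩ := List.mem_map.mp hmem
        obtain ⟨a, b⟩ := p
        cases b with
        | none => exact hnone (a, none) hp rfl
        | some v =>
          rw [pvRank_some] at hpr
          subst h0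
          split at hpr <;> omega
      by_cases hall : (r.map (·.2)).all (fun valor => valor == some "VERDADERO") = true
      · -- every rank is 2, so m = 2
        have h2 : m = 2 := by
          obtain ⟨p, hp, hpr⟩ := List.mem_map.mp hmem
          rw [List.all_eq_true] at hall
          have hv := hall p.2 (List.mem_map.mpr ⟨p, hp, rfl⟩)
          obtain ⟨a, b⟩ := p
          cases b with
          | none => exact absurd rfl (hnone (a, none) hp)
          | some v =>
            rw [show ((a, some v) : String × Option String).2 = some v from rfl,
              Option.some_beq_some] at hv
            rw [pvRank_some, if_pos hv] at hpr
            omega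
        subst h2
        simp only [hany, hall, if_true, if_false]
        decide
      · -- some value is neither none nor VERDADERO: 1 is a rank, so m = 1
        have h1 : m = 1 := by
          rw [List.all_eq_true] at hall
          push_neg at hall
          obtain ⟨x, hx, hxv⟩ := hall
          obtain ⟨p, hp, rfl⟩ := List.mem_map.mp hx
          have : (1 : Nat) ∈ r.map pvRank := by
            refine List.mem_map.mpr ⟨p, hp, ?_⟩
            obtain ⟨a, b⟩ := p
            cases b with
            | none => exact absurd rfl (hnone (a, none) hp)
            | some v =>
              rw [show ((a, some v) : String × Option String).2 = some v from rfl,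
                Option.some_beq_some] at hxv
              rw [pvRank_some, if_neg hxv]
          have := hmin 1 this
          omega
        subst h1
        have hall' : ((r.map (·.2)).all (fun valor => valor == some "VERDADERO")) = false :=
          Bool.not_eq_true _ |>.mp hall
        simp only [hany, hall', if_false]
        decide
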